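-- pv_equiv track=rewrite | github.com/kimnam1/algorithm | 04bronze3/맞은문제/집_주소.py | address
-- ===== SOURCE A (Python) =====
-- def address(a:int):
--     figure = len(str(a))
--     numberlist = []
--     sum = 0
--     for i in range(figure):
--         numberlist.append(int(str(a)[i]))
--     for i in range(figure):
--         d = numberlist[i]
--         if d == 0:
--            sum += 4
--         elif d == 1:
--             sum += 2
--         else:
--             sum += 3
--     return sum + (figure-1) * 1 + 2
-- ===== SOURCE B (Python) =====
-- def address(a: int):
--     s = str(a)
--     return 4 * len(s) + s.count('0') - s.count('1') + 1
-- ===== Notes on version B (the rewrite author's own statement) =====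
-- stated objective: simpler
-- what changed: Replaces A's two index loops (building a digit list, then branch-accumulating per-digit weights) with a closed form: four times the string length plus the count of zero digits minus the count of one digits plus one.
-- outside the precondition, e.g. on address(-1): A raises ValueError, B returns 8
import Mathlib
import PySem

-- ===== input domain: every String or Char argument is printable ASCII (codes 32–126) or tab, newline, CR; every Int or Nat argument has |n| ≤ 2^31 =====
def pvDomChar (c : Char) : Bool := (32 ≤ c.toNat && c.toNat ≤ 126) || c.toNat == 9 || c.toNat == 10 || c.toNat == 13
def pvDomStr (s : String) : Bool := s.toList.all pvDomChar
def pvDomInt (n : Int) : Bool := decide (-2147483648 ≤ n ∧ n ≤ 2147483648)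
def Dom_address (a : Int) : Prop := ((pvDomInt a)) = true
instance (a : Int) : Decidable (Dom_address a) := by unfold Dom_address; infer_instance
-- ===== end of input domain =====

-- B replaces A's two index loops with a closed form: four times the digit count, plus the number of zero digits, minus the number of one digits, plus one (simpler; same cost).

-- ===== PORT A =====
-- int(str(a)[i]) for one character: exact when the character is a decimal digit
-- (guaranteed under Pre_address, i.e. 0 ≤ a); ofChars? = none is Python's ValueError.
def pyIntOfChar (c : Char) : Int := (PySem.Int.ofChars? [c]).getD 0

def address (a : Int) : Int :=
  let figure : Int := ((PySem.Int.toChars a).length : Int)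
  let numberlist : List Int :=
    (PySem.List.pyRange 0 figure 1).foldl
      (fun nl i => nl ++ [pyIntOfChar (PySem.List.pyGetD (PySem.Int.toChars a) i ' ')]) []
  let sum : Int :=
    (PySem.List.pyRange 0 figure 1).foldl
      (fun acc i =>
        let d := PySem.List.pyGetD numberlist i 0
        if d = 0 then acc + 4 else if d = 1 then acc + 2 else acc + 3) 0
  sum + (figure - 1) * 1 + 2

-- ===== PORT B =====
def address_alt (a : Int) : Int :=
  let s := PySem.Int.toChars a
  4 * (s.length : Int) + ((PySem.Chars.count s ['0'] : Int)) - ((PySem.Chars.count s ['1'] : Int)) + 1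

-- ===== PRECONDITION & SPEC =====
-- Pre_ excludes a < 0: there A raises ValueError on the '-' character (int('-')).
def Pre_address (a : Int) : Prop := 0 ≤ a
instance (a : Int) : Decidable (Pre_address a) := by unfold Pre_address; infer_instance
def pvWitness_address : Int := 102

def Spec_address (a : Int) (out : Int) : Prop := out = address_alt a
instance (a : Int) (out : Int) : Decidable (Spec_address a out) := by unfold Spec_address; infer_instance

-- ===== CLAIM (what is proved, stated in full; the proofs are below) =====
def Claim_equal_address : Prop := ∀ (a : Int), Dom_address a → Pre_address a → Spec_address a (address a)

-- ===== LEMMAS AND PROOFS =====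

-- s.count(c) for a single-character needle is the character count.
theorem count_go_singleton (c : Char) :
    ∀ (s : List Char) (fuel : Nat) (acc : Nat), s.length ≤ fuel →
      PySem.Chars.count.go [c] fuel s acc = acc + s.countP (· = c) := by
  intro s
  induction s with
  | nil => intro fuel acc _; cases fuel <;> simp [PySem.Chars.count.go]
  | cons h t ih =>
    intro fuel acc hf
    cases fuel with
    | zero => simp at hf
    | succ f =>
      by_cases hc : h = c
      · subst hc
        simp only [PySem.Chars.count.go, List.isPrefixOf, BEq.rfl, Bool.true_and,
          List.length_cons, List.length_nil, List.drop_succ_cons, List.drop_zero, if_pos]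
        rw [ih f (acc + 1) (by simpa using hf)]
        simp
        omega
      · have hpre : List.isPrefixOf [c] (h :: t) = false := by
          simp [List.isPrefixOf]; exact fun e => hc e.symm
        simp only [PySem.Chars.count.go, hpre, Bool.false_eq_true, if_false]
        rw [ih f acc (by simpa using hf)]
        simp [hc]

theorem count_singleton (s : List Char) (c : Char) :
    PySem.Chars.count s [c] = s.countP (· = c) := by
  simp [PySem.Chars.count, count_go_singleton c s s.length 0 le_rfl]

-- every character produced by Nat.toDigitsCore is a digitChar or comes from the seed list
theorem mem_toDigitsCore :
    ∀ (f n : Nat) (l : List Char) (c : Char), c ∈ Nat.toDigitsCore 10 f n l →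
      c ∈ l ∨ ∃ k, k < 10 ∧ c = Nat.digitChar k := by
  intro f
  induction f with
  | zero => intro n l c h; exact Or.inl h
  | succ f ih =>
    intro n l c h
    simp only [Nat.toDigitsCore] at h
    split at h
    · rcases List.mem_cons.mp h with h' | h'
      · exact Or.inr ⟨n % 10, Nat.mod_lt _ (by omega), h'⟩
      · exact Or.inl h'
    · rcases ih (n / 10) (Nat.digitChar (n % 10) :: l) c h with h' | h'
      · rcases List.mem_cons.mp h' with h'' | h''
        · exact Or.inr ⟨n % 10, Nat.mod_lt _ (by omega), h''⟩
        · exact Or.inl h''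
      · exact Or.inr h'

theorem digit_of_mem_toChars (a : Int) (ha : 0 ≤ a) (c : Char)
    (hc : c ∈ PySem.Int.toChars a) : ∃ k, k < 10 ∧ c = Nat.digitChar k := by
  have hlt : ¬ a < 0 := not_lt.mpr ha
  simp only [PySem.Int.toChars, if_neg hlt, Nat.toDigits] at hc
  rcases mem_toDigitsCore _ _ _ _ hc with h | hk
  · simp at h
  · exact hk

-- per-digit weight: A's branch weight equals 3 + [c = '0'] - [c = '1']
theorem digit_weight (c : Char) (h : ∃ k, k < 10 ∧ c = Nat.digitChar k) :
    (if pyIntOfChar c = 0 then (4:Int) else if pyIntOfChar c = 1 then 2 else 3)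
      = 3 + (if c = '0' then 1 else 0) - (if c = '1' then 1 else 0) := by
  rcases h with ⟨k, hk, rfl⟩
  interval_cases k <;> decide

-- the accumulation loop, over any all-digit char list
theorem foldl_weight (s : List Char) (hd : ∀ c ∈ s, ∃ k, k < 10 ∧ c = Nat.digitChar k) :
    ∀ acc : Int,
      s.foldl (fun acc c =>
        if pyIntOfChar c = 0 then acc + 4 else if pyIntOfChar c = 1 then acc + 2 else acc + 3) acc
      = acc + 3 * s.length + (s.countP (· = '0') : Int) - (s.countP (· = '1') : Int) := by
  induction s with
  | nil => intro acc; simp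
  | cons h t ih =>
    intro acc
    have hw := digit_weight h (hd h (List.mem_cons_self))
    have ht : ∀ c ∈ t, ∃ k, k < 10 ∧ c = Nat.digitChar k :=
      fun c hc => hd c (List.mem_cons_of_mem _ hc)
    simp only [List.foldl_cons, List.countP_cons, List.length_cons]
    rw [ih ht]
    have step : (if pyIntOfChar h = 0 then acc + 4 else if pyIntOfChar h = 1 then acc + 2 else acc + 3)
        = acc + (if pyIntOfChar h = 0 then (4:Int) else if pyIntOfChar h = 1 then 2 else 3) := by
      split_ifs <;> ring
    rw [step, hw]
    by_cases h0 : h = '0' <;> by_cases h1 : h = '1' <;> simp [h0, h1] <;> ring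

-- ===== VERDICT (by name: the statement is the Claim_ definition above) =====
theorem address_spec : Claim_equal_address := by
  intro a _hdom hpre
  unfold Spec_address address address_alt
  set s := PySem.Int.toChars a with hs
  have hdig : ∀ c ∈ s, ∃ k, k < 10 ∧ c = Nat.digitChar k :=
    fun c hc => digit_of_mem_toChars a hpre c hc
  -- first loop: numberlist = s.map pyIntOfChar
  have hnl : (PySem.List.pyRange 0 (s.length : Int) 1).foldl
      (fun nl i => nl ++ [pyIntOfChar (PySem.List.pyGetD s i ' ')]) []
      = s.map pyIntOfChar := by
    rw [PySem.List.foldl_append_singleton_eq_map]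
    have hmm : List.map (fun i => pyIntOfChar (PySem.List.pyGetD s i ' '))
        (PySem.List.pyRange 0 (s.length : Int))
        = List.map pyIntOfChar
            (List.map (fun i => PySem.List.pyGetD s i ' ') (PySem.List.pyRange 0 (s.length : Int))) := by
      simp [Function.comp]
    simp only [List.nil_append]
    rw [hmm, PySem.List.map_pyGetD_pyRange_zero' s ' ']
  simp only [hnl]
  -- second loop: fold over the mapped list, then over s itself
  have hsum : (PySem.List.pyRange 0 ((s.map pyIntOfChar).length : Int) 1).foldl
      (fun acc i =>
        if PySem.List.pyGetD (s.map pyIntOfChar) i 0 = 0 then acc + 4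
        else if PySem.List.pyGetD (s.map pyIntOfChar) i 0 = 1 then acc + 2 else acc + 3) (0 : Int)
      = (s.map pyIntOfChar).foldl
          (fun acc d => if d = 0 then acc + 4 else if d = 1 then acc + 2 else acc + 3) 0 :=
    PySem.List.foldl_pyRange_zero_pyGetD' (s.map pyIntOfChar) 0
      (fun acc d => if d = 0 then acc + 4 else if d = 1 then acc + 2 else acc + 3) 0
  simp only [List.length_map] at hsum
  rw [hsum, List.foldl_map, foldl_weight s hdig 0, count_singleton, count_singleton]
  ring
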